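-- pv_equiv track=rewrite | github.com/JorgeBelCampos/JAVATransformation | src/javamigrator/analysis/model_builder.py | _extract_annotation_block_before
-- ===== SOURCE A (Python) =====
-- def _extract_annotation_block_before(content: str, position: int) -> str:
--     lines = content[:position].splitlines()
--     collected: list[str] = []
--
--     for line in reversed(lines):
--         stripped = line.strip()
--         if not stripped:
--             if collected:
--                 break
--             continue
--         if stripped.startswith("@") or stripped.startswith("//") or stripped.startswith("/*") or stripped.startswith("*"):
--             collected.append(line)
--             continue
--         if collected:
--             break
--
--     return "\n".join(reversed(collected))
-- ===== SOURCE B (Python) =====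
-- def _is_annotation(line: str) -> bool:
--     s = line.strip()
--     return bool(s) and (s.startswith("@") or s.startswith("//") or s.startswith("/*") or s.startswith("*"))
--
--
-- def _extract_annotation_block_before(content: str, position: int) -> str:
--     block: list[str] = []
--     last: list[str] = []
--     for line in content[:position].splitlines():
--         if _is_annotation(line):
--             block.append(line)
--         else:
--             if block:
--                 last = block
--             block = []
--     if block:
--         last = block
--     return "\n".join(last)
-- ===== Notes on version B (the rewrite author's own statement) =====
-- stated objective: alternative
-- what changed: Replaced A's backward scan over reversed(lines) with early-break by a single forward pass that maintains the current run of annotation lines and the last finished run, returning the last maximal run.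
import Mathlib
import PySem

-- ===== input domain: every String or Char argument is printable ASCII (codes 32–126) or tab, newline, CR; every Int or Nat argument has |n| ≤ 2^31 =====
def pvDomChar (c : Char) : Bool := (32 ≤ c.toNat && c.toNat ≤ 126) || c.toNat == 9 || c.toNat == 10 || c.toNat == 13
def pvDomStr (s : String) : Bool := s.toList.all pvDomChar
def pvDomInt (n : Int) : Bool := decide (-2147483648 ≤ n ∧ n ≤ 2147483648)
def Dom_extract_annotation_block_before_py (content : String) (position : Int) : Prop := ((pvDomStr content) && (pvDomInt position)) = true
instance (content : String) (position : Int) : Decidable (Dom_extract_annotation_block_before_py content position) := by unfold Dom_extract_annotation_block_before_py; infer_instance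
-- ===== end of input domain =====

-- B replaces A's backward scan-with-break by a single forward pass keeping the last maximal
-- run of annotation lines (objective: alternative decomposition; same cost).


-- ===== PORT A =====
-- backward loop over reversed lines, with `break` rendered as returning the accumulator
def pvGoA (rls : List String) (collected : List String) : List String :=
  match rls with
  | [] => collected
  | line :: rest =>
    -- stripped := line.strip()
    if PySem.Str.strip line = "" then
      if collected ≠ [] then collected else pvGoA rest collected
    else if PySem.Str.startswith (PySem.Str.strip line) "@" || PySem.Str.startswith (PySem.Str.strip line) "//" ||
            PySem.Str.startswith (PySem.Str.strip line) "/*" || PySem.Str.startswith (PySem.Str.strip line) "*" then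
      pvGoA rest (collected ++ [line])
    else
      if collected ≠ [] then collected else pvGoA rest collected

def extract_annotation_block_before_py (content : String) (position : Int) : String :=
  PySem.Str.join "\n"
    (pvGoA (PySem.Str.splitlines (PySem.Str.slice content none (some position))).reverse []).reverse

-- ===== PORT B =====
def pvIsAnnotation (line : String) : Bool :=
  (PySem.Str.strip line != "") &&
    (PySem.Str.startswith (PySem.Str.strip line) "@" || PySem.Str.startswith (PySem.Str.strip line) "//" ||
     PySem.Str.startswith (PySem.Str.strip line) "/*" || PySem.Str.startswith (PySem.Str.strip line) "*")

-- forward loop maintaining the current run `block` and the last finished run `last`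
def pvGoB (ls : List String) (block last : List String) : List String :=
  match ls with
  | [] => if block ≠ [] then block else last
  | line :: rest =>
    if pvIsAnnotation line then pvGoB rest (block ++ [line]) last
    else pvGoB rest [] (if block ≠ [] then block else last)

def extract_annotation_block_before_py_alt (content : String) (position : Int) : String :=
  PySem.Str.join "\n"
    (pvGoB (PySem.Str.splitlines (PySem.Str.slice content none (some position))) [] [])

-- ===== PRECONDITION & SPEC =====
def Spec_extract_annotation_block_before_py (content : String) (position : Int) (out : String) : Prop := out = extract_annotation_block_before_py_alt content position
instance (content : String) (position : Int) (out : String) : Decidable (Spec_extract_annotation_block_before_py content position out) := by unfold Spec_extract_annotation_block_before_py; infer_instance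

-- ===== CLAIM (what is proved, stated in full; the proofs are below) =====
def Claim_equal_extract_annotation_block_before_py : Prop := ∀ (content : String) (position : Int), Dom_extract_annotation_block_before_py content position → Spec_extract_annotation_block_before_py content position (extract_annotation_block_before_py content position)

-- ===== LEMMAS AND PROOFS =====

-- the fold step performed by one iteration of B's loop, and its final read-out
def pvStepB (st : List String × List String) (line : String) : List String × List String :=
  if pvIsAnnotation line then (st.1 ++ [line], st.2)
  else ([], if st.1 ≠ [] then st.1 else st.2)

def pvFin (st : List String × List String) : List String :=
  if st.1 ≠ [] then st.1 else st.2

lemma pvAnn_true (l : String) (h1 : ¬ PySem.Str.strip l = "")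
    (h2 : (PySem.Str.startswith (PySem.Str.strip l) "@" || PySem.Str.startswith (PySem.Str.strip l) "//" ||
           PySem.Str.startswith (PySem.Str.strip l) "/*" || PySem.Str.startswith (PySem.Str.strip l) "*") = true) :
    pvIsAnnotation l = true := by
  have hne : (PySem.Str.strip l != "") = true := bne_iff_ne.mpr h1
  unfold pvIsAnnotation
  rw [hne, h2]
  rfl

lemma pvAnn_false_blank (l : String) (h1 : PySem.Str.strip l = "") :
    pvIsAnnotation l = false := by
  unfold pvIsAnnotation
  rw [h1]
  rfl

lemma pvAnn_false_other (l : String)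
    (h2 : ¬ (PySem.Str.startswith (PySem.Str.strip l) "@" || PySem.Str.startswith (PySem.Str.strip l) "//" ||
             PySem.Str.startswith (PySem.Str.strip l) "/*" || PySem.Str.startswith (PySem.Str.strip l) "*") = true) :
    pvIsAnnotation l = false := by
  unfold pvIsAnnotation
  rw [Bool.eq_false_iff.mpr h2, Bool.and_false]

lemma pvGoB_eq_foldl : ∀ (ls : List String) (b la : List String),
    pvGoB ls b la = pvFin (ls.foldl pvStepB (b, la)) := by
  intro ls
  induction ls with
  | nil => intro b la; rfl
  | cons l t ih =>
    intro b la
    by_cases h : pvIsAnnotation l = true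
    · simp only [pvGoB, h, if_true, ih, List.foldl_cons, pvStepB]
    · simp only [pvGoB, if_neg h, List.foldl_cons]
      rw [ih]
      simp only [pvStepB, if_neg h]

-- the maximal all-annotation prefix of a (reversed) line list
def pvAsr : List String → List String
  | [] => []
  | l :: t => if pvIsAnnotation l then l :: pvAsr t else []

-- A's loop with a nonempty accumulator collects exactly the leading annotation run
lemma pvGoA_nonempty : ∀ (rls acc : List String), acc ≠ [] →
    pvGoA rls acc = acc ++ pvAsr rls := by
  intro rls
  induction rls with
  | nil => intro acc _; simp [pvGoA, pvAsr]
  | cons l t ih =>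
    intro acc hacc
    by_cases h1 : PySem.Str.strip l = ""
    · rw [pvGoA, if_pos h1, if_pos hacc, pvAsr, if_neg (by rw [pvAnn_false_blank l h1]; exact Bool.false_ne_true)]
      simp
    · by_cases h2 : (PySem.Str.startswith (PySem.Str.strip l) "@" || PySem.Str.startswith (PySem.Str.strip l) "//" ||
            PySem.Str.startswith (PySem.Str.strip l) "/*" || PySem.Str.startswith (PySem.Str.strip l) "*") = true
      · rw [pvGoA, if_neg h1, if_pos h2, ih (acc ++ [l]) (by simp),
            pvAsr, if_pos (pvAnn_true l h1 h2)]
        simp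
      · rw [pvGoA, if_neg h1, if_neg h2, if_pos hacc,
            pvAsr, if_neg (by rw [pvAnn_false_other l h2]; exact Bool.false_ne_true)]
        simp

-- the run component of B's fold state is the reversed annotation prefix of the reversed list
lemma pvFold_fst : ∀ (ls : List String),
    ((ls.foldl pvStepB ([], [])).1).reverse = pvAsr ls.reverse := by
  intro ls
  induction ls using List.reverseRecOn with
  | nil => simp [pvAsr]
  | append_singleton t l ih =>
    by_cases h : pvIsAnnotation l = true <;>
      simp [List.foldl_append, pvStepB, h, pvAsr, ih]

-- main bridge: A's backward collection, reversed, is B's fold read-out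
lemma pvGoA_eq_fin : ∀ (ls : List String),
    (pvGoA ls.reverse []).reverse = pvFin (ls.foldl pvStepB ([], [])) := by
  intro ls
  induction ls using List.reverseRecOn with
  | nil => simp [pvGoA, pvFin]
  | append_singleton t l ih =>
    rw [List.reverse_append, List.reverse_singleton, List.singleton_append,
        List.foldl_append, List.foldl_cons, List.foldl_nil]
    by_cases h1 : PySem.Str.strip l = ""
    · rw [pvGoA, if_pos h1, if_neg (by simp), ih, pvStepB,
          if_neg (by rw [pvAnn_false_blank l h1]; exact Bool.false_ne_true)]
      by_cases hb : (t.foldl pvStepB ([], [])).1 = [] <;> simp [pvFin, hb]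
    · by_cases h2 : (PySem.Str.startswith (PySem.Str.strip l) "@" || PySem.Str.startswith (PySem.Str.strip l) "//" ||
            PySem.Str.startswith (PySem.Str.strip l) "/*" || PySem.Str.startswith (PySem.Str.strip l) "*") = true
      · rw [pvGoA, if_neg h1, if_pos h2,
            pvGoA_nonempty t.reverse ([] ++ [l]) (by simp),
            pvStepB, if_pos (pvAnn_true l h1 h2)]
        have hasr : (pvAsr t.reverse).reverse = (t.foldl pvStepB ([], [])).1 := by
          rw [← pvFold_fst]; simp
        simp [pvFin, hasr]
      · rw [pvGoA, if_neg h1, if_neg h2, if_neg (by simp), ih, pvStepB,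
            if_neg (by rw [pvAnn_false_other l h2]; exact Bool.false_ne_true)]
        by_cases hb : (t.foldl pvStepB ([], [])).1 = [] <;> simp [pvFin, hb]

-- ===== VERDICT (by name: the statement is the Claim_ definition above) =====
theorem extract_annotation_block_before_py_spec : Claim_equal_extract_annotation_block_before_py := by
  intro content position _
  unfold Spec_extract_annotation_block_before_py
  unfold extract_annotation_block_before_py extract_annotation_block_before_py_alt
  rw [pvGoB_eq_foldl, pvGoA_eq_fin]
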